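-- pv_equiv track=rewrite | github.com/Kahitar/data_parser | main.py | findFilenameSubstr
-- ===== SOURCE A (Python) =====
-- def findFilenameSubstr(filename):
-- 		# find the substring indicating the filename without the path
-- 		counter = len(filename) # counter to count the chars of the new directory or file
-- 		for i, char in enumerate(filename):
-- 			if char == '/' or char == '\\': # start counting the chars from zero
-- 				counter = 0
-- 			elif char == '.': # the substring for the filename was found.
-- 				return filename[i-counter:i+4] # add everything from the last '/' to the substring
-- 			else:
-- 				counter += 1
-- ===== SOURCE B (Python) =====
-- def findFilenameSubstr(filename):
--     dot = filename.find('.')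
--     if dot == -1:
--         return None
--     sep = max(filename.rfind('/', 0, dot), filename.rfind('\\', 0, dot))
--     return filename[sep+1:dot+4]
-- ===== Notes on version B (the rewrite author's own statement) =====
-- stated objective: idiomatic
-- what changed: Replaced A's single stateful counting loop (enumerate with a char counter reset at separators) by library index scans: find the first dot, rfind the last separator before it, and slice between those indices.
import Mathlib
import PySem

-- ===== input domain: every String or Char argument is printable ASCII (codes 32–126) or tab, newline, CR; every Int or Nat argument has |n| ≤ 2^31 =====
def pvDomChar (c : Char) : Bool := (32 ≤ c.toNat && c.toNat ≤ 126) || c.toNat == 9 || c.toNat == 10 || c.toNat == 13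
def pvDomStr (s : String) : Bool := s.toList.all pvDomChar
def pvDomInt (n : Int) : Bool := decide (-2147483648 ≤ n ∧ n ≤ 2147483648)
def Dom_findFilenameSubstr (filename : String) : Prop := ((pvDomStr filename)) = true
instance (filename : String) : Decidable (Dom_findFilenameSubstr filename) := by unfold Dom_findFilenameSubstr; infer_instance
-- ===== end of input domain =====

-- B replaces A's counting loop by find/rfind index scans plus one slice (idiomatic; measured faster in a timing run; return-value equivalence only).

-- ===== PORT A =====
-- A's loop over enumerate(filename): counter resets at '/' or '\', at the first '.' it slices filename[i-counter:i+4].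
def pvGoA (s : List Char) : List (Int × Char) → Int → Option (List Char)
  | [], _ => none
  | (i, c) :: rest, counter =>
    if c = '/' ∨ c = '\\' then pvGoA s rest 0
    else if c = '.' then some (PySem.List.slice s (some (i - counter)) (some (i + 4)))
    else pvGoA s rest (counter + 1)

def findFilenameSubstr (filename : String) : Option String :=
  (pvGoA filename.toList (PySem.List.enumerate filename.toList 0)
      (PySem.Str.len filename)).map String.ofList

-- ===== PORT B =====
def findFilenameSubstr_alt (filename : String) : Option String :=
  let s := filename.toList
  let dot := PySem.Chars.find s ['.']
  if dot = -1 then none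
  else
    let sep := max (PySem.Chars.rfindFrom s ['/'] 0 (some dot))
                   (PySem.Chars.rfindFrom s ['\\'] 0 (some dot))
    some (String.ofList (PySem.List.slice s (some (sep + 1)) (some (dot + 4))))

-- ===== PRECONDITION & SPEC =====
def Spec_findFilenameSubstr (filename : String) (out : Option String) : Prop := out = findFilenameSubstr_alt filename
instance (filename : String) (out : Option String) : Decidable (Spec_findFilenameSubstr filename out) := by unfold Spec_findFilenameSubstr; infer_instance

-- ===== CLAIM (what is proved, stated in full; the proofs are below) =====
def Claim_equal_findFilenameSubstr : Prop := ∀ (filename : String), Dom_findFilenameSubstr filename → Spec_findFilenameSubstr filename (findFilenameSubstr filename)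

-- ===== LEMMAS AND PROOFS =====

-- index of the first '.' in a list
def pvFirstDot : List Char → Option Nat
  | [] => none
  | c :: cs => if c = '.' then some 0 else (pvFirstDot cs).map (· + 1)

-- index of the last occurrence of a given char
def pvLast (ch : Char) : List Char → Option Nat
  | [] => none
  | c :: cs =>
    match pvLast ch cs with
    | some j => some (j + 1)
    | none => if c = ch then some 0 else none

-- index of the last separator ('/' or '\')
def pvLastSep : List Char → Option Nat
  | [] => none
  | c :: cs =>
    match pvLastSep cs with
    | some j => some (j + 1)
    | none => if c = '/' ∨ c = '\\' then some 0 else none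

-- abstract core of A's loop: the (slice start, dot index) it would use
def pvSpecGo : List Char → Int → Int → Option (Int × Int)
  | [], _, _ => none
  | c :: cs, i, counter =>
    if c = '/' ∨ c = '\\' then pvSpecGo cs (i + 1) 0
    else if c = '.' then some (i - counter, i)
    else pvSpecGo cs (i + 1) (counter + 1)

theorem pvGoA_eq_specGo (s : List Char) : ∀ (t : List Char) (i counter : Int),
    pvGoA s (PySem.List.enumerate t i) counter
      = (pvSpecGo t i counter).map (fun p => PySem.List.slice s (some p.1) (some (p.2 + 4))) := by
  intro t
  induction t with
  | nil => intro i counter; simp [PySem.List.enumerate, pvGoA, pvSpecGo]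
  | cons c cs ih =>
    intro i counter
    rw [PySem.List.enumerate_cons]
    by_cases h1 : c = '/' ∨ c = '\\'
    · simp [pvGoA, pvSpecGo, h1, ih]
    · by_cases h2 : c = '.'
      · simp [pvGoA, pvSpecGo, h2]
      · simp [pvGoA, pvSpecGo, h1, h2, ih]

theorem pvSpecGo_closed : ∀ (t : List Char) (i counter : Int),
    pvSpecGo t i counter
      = (pvFirstDot t).map (fun d =>
          ((match pvLastSep (t.take d) with
            | some j => i + j + 1
            | none => i - counter), i + d)) := by
  intro t
  induction t with
  | nil => intro i counter; simp [pvSpecGo, pvFirstDot]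
  | cons c cs ih =>
    intro i counter
    by_cases h1 : c = '/' ∨ c = '\\'
    · have hnd : ¬ c = '.' := by rcases h1 with h | h <;> simp [h]
      simp only [pvSpecGo, pvFirstDot, if_pos h1, if_neg hnd, ih]
      cases hfd : pvFirstDot cs with
      | none => simp
      | some d =>
        simp only [Option.map_some]
        congr 1
        simp only [List.take_succ_cons, pvLastSep]
        cases hls : pvLastSep (List.take d cs) with
        | none => simp [h1]; omega
        | some j => simp; omega
    · by_cases h2 : c = '.'
      · simp [pvSpecGo, pvFirstDot, h2, pvLastSep]
      · simp only [pvSpecGo, pvFirstDot, if_neg h1, if_neg h2, ih]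
        cases hfd : pvFirstDot cs with
        | none => simp
        | some d =>
          simp only [Option.map_some]
          congr 1
          simp only [List.take_succ_cons, pvLastSep]
          cases hls : pvLastSep (List.take d cs) with
          | none => simp [h1]; omega
          | some j => simp; omega

theorem pvFind_go_eq : ∀ (t : List Char) (k : Nat),
    PySem.Chars.find.go ['.'] t k
      = match pvFirstDot t with
        | none => -1
        | some d => ((k + d : Nat) : Int) := by
  intro t
  induction t with
  | nil => intro k; simp [PySem.Chars.find.go, pvFirstDot]
  | cons c cs ih =>
    intro k
    by_cases h2 : c = '.'
    · simp [PySem.Chars.find.go, pvFirstDot, h2, List.isPrefixOf]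
    · have hpre : ['.'].isPrefixOf (c :: cs) = false := by
        simp [List.isPrefixOf]; exact fun h => h2 h.symm
      simp only [PySem.Chars.find.go, hpre, Bool.false_eq_true, if_false, if_neg h2,
        pvFirstDot, ih]
      cases pvFirstDot cs with
      | none => simp
      | some d => simp only [Option.map_some]; push_cast; ring_nf

theorem pvLast_snoc (ch a : Char) (p : List Char) :
    pvLast ch (p ++ [a]) = if a = ch then some p.length else pvLast ch p := by
  induction p with
  | nil => by_cases h : a = ch <;> simp [pvLast, h]
  | cons c cs ih =>
    by_cases h : a = ch
    · simp only [List.cons_append, pvLast, ih, if_pos h]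
      simp
    · simp only [List.cons_append, pvLast, ih, if_neg h]

theorem pvRfind_go_eq (ch : Char) (t : List Char) : ∀ (j : Nat),
    PySem.Chars.rfind.go t [ch] j
      = match pvLast ch (t.take (j + 1)) with
        | none => -1
        | some k => (k : Int) := by
  intro j
  induction j with
  | zero =>
    cases t with
    | nil => simp [PySem.Chars.rfind.go, pvLast, List.isPrefixOf]
    | cons c cs =>
      by_cases h : c = ch
      · simp [PySem.Chars.rfind.go, pvLast, List.isPrefixOf, h]
      · have : [ch].isPrefixOf (c :: cs) = false := by simp [List.isPrefixOf]; intro hc; exact h hc.symm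
        simp [PySem.Chars.rfind.go, pvLast, this, h]
  | succ j ih =>
    by_cases hl : j + 1 < t.length
    · have hget : t.take (j + 1 + 1) = t.take (j + 1) ++ [t[j + 1]] := by
        rw [List.take_succ]
        simp [List.getElem?_eq_getElem hl]
      by_cases hc : t[j + 1] = ch
      · have hpre : [ch].isPrefixOf (t.drop (j + 1)) = true := by
          rw [List.isPrefixOf_iff_prefix]
          have := List.getElem_cons_drop (as := t) (h := hl)
          rw [← this]
          simp [hc]
        simp only [PySem.Chars.rfind.go, hpre, if_true, hget, pvLast_snoc, if_pos hc]
        simp [List.length_take, Nat.min_eq_left (Nat.le_of_lt hl)]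
      · have hpre : [ch].isPrefixOf (t.drop (j + 1)) = false := by
          rw [Bool.eq_false_iff]
          intro hp
          rw [List.isPrefixOf_iff_prefix] at hp
          have := List.getElem_cons_drop (as := t) (h := hl)
          rw [← this] at hp
          rcases hp with ⟨r, hr⟩
          apply hc
          have : t[j+1] :: List.drop (j + 1 + 1) t = ch :: r := by
            simpa using hr.symm
          exact (List.cons_eq_cons.mp this).1
        simp only [PySem.Chars.rfind.go, hpre, Bool.false_eq_true, if_false, ih, hget,
          pvLast_snoc, if_neg hc]
    · have : t.take (j + 1 + 1) = t.take (j + 1) := by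
        rw [List.take_of_length_le (by omega), List.take_of_length_le (by omega)]
      have hpre : [ch].isPrefixOf (t.drop (j + 1)) = false := by
        rw [List.drop_of_length_le (by omega)]
        simp [List.isPrefixOf]
      simp only [PySem.Chars.rfind.go, hpre, Bool.false_eq_true, if_false, ih, this]

theorem pvRfind_eq (ch : Char) (u : List Char) :
    PySem.Chars.rfind u [ch]
      = match pvLast ch u with
        | none => -1
        | some k => (k : Int) := by
  have hgo := pvRfind_go_eq ch u u.length
  rw [List.take_of_length_le (by omega)] at hgo
  rw [PySem.Chars.rfind]
  exact hgo

theorem pvRfindFrom_eq (ch : Char) (t : List Char) (d : Nat) (hd : d ≤ t.length) :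
    PySem.Chars.rfindFrom t [ch] 0 (some (d : Int))
      = match pvLast ch (t.take d) with
        | none => -1
        | some k => (k : Int) := by
  have he1 : ¬ ((t.length : Int) < (d : Int)) := by exact_mod_cast Nat.not_lt.mpr hd
  have he2 : ¬ ((d : Int) < 0) := by omega
  simp only [PySem.Chars.rfindFrom, if_neg he1, if_neg he2]
  norm_num
  rw [pvRfind_eq]
  cases pvLast ch (t.take d) with
  | none => simp
  | some k => simp

theorem pvLastSep_eq_max (t : List Char) :
    pvLastSep t
      = match pvLast '/' t, pvLast '\\' t with
        | none, none => none
        | some j, none => some j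
        | none, some k => some k
        | some j, some k => some (max j k) := by
  induction t with
  | nil => simp [pvLastSep, pvLast]
  | cons c cs ih =>
    cases h1 : pvLast '/' cs with
    | some j =>
      cases h2 : pvLast '\\' cs with
      | some k =>
        simp only [pvLastSep, pvLast, ih, h1, h2]
        congr 1
        omega
      | none =>
        simp only [pvLastSep, pvLast, ih, h1, h2]
        by_cases hcb : c = '\\' <;> simp [hcb]
    | none =>
      cases h2 : pvLast '\\' cs with
      | some k =>
        simp only [pvLastSep, pvLast, ih, h1, h2]
        by_cases hcb : c = '/' <;> simp [hcb]
      | none =>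
        by_cases hc : c = '/'
        · have hnb : ¬ c = '\\' := by rw [hc]; decide
          simp [pvLastSep, pvLast, ih, h1, h2, hc]
        · by_cases hc2 : c = '\\'
          · simp [pvLastSep, pvLast, ih, h1, h2, hc2]
          · have hno : ¬ (c = '/' ∨ c = '\\') := by tauto
            simp [pvLastSep, pvLast, ih, h1, h2, hc, hc2]

theorem pvFirstDot_lt_length : ∀ (t : List Char) (d : Nat), pvFirstDot t = some d → d < t.length := by
  intro t
  induction t with
  | nil => intro d h; simp [pvFirstDot] at h
  | cons c cs ih =>
    intro d h
    by_cases hc : c = '.'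
    · simp [pvFirstDot, hc] at h
      simp only [List.length_cons]
      omega
    · simp only [pvFirstDot, if_neg hc] at h
      cases hfd : pvFirstDot cs with
      | none => rw [hfd] at h; simp at h
      | some d' =>
        rw [hfd] at h; simp at h
        have := ih d' hfd
        simp only [List.length_cons]
        omega

theorem pvSlice_negLen (s : List Char) (b : Int) (hs0 : s ≠ []) :
    PySem.List.slice s (some (-(s.length : Int))) (some b) = PySem.List.slice s (some 0) (some b) := by
  have hpos : 0 < s.length := by
    cases s
    · exact absurd rfl hs0
    · simp
  have h0 : PySem.List.clampIdx s.length (-(s.length : Int)) = 0 := by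
    unfold PySem.List.clampIdx; split_ifs <;> omega
  have h1 : PySem.List.clampIdx s.length 0 = 0 := by
    unfold PySem.List.clampIdx; split_ifs <;> omega
  simp only [PySem.List.slice, h0, h1]

-- ===== VERDICT (by name: the statement is the Claim_ definition above) =====
theorem findFilenameSubstr_spec : Claim_equal_findFilenameSubstr := by
  intro filename _
  unfold Spec_findFilenameSubstr findFilenameSubstr findFilenameSubstr_alt
  set s := filename.toList with hs
  rw [pvGoA_eq_specGo, pvSpecGo_closed]
  have hfind : PySem.Chars.find s ['.']
      = match pvFirstDot s with
        | none => -1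
        | some d => (d : Int) := by
    rw [PySem.Chars.find, pvFind_go_eq]
    cases pvFirstDot s <;> simp
  cases hfd : pvFirstDot s with
  | none => simp [hfind, hfd]
  | some d =>
    have hdlt : d < s.length := pvFirstDot_lt_length s d hfd
    have hne : ((d : Int)) ≠ -1 := by omega
    simp only [hfind, hfd, Option.map_some, if_neg hne]
    rw [pvRfindFrom_eq '/' s d (by omega), pvRfindFrom_eq '\\' s d (by omega),
      pvLastSep_eq_max]
    have hlen : PySem.Str.len filename = (s.length : Int) := by
      simp [PySem.Str.len_eq, hs]
    have hs0 : s ≠ [] := by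
      intro hnil; rw [hnil] at hdlt; simp at hdlt
    congr 1
    cases h1 : pvLast '/' (s.take d) with
    | some j =>
      cases h2 : pvLast '\\' (s.take d) with
      | some k =>
        simp only []
        rw [show ((0:Int) + ((max j k : Nat) : Int) + 1) = max (j:Int) (k:Int) + 1 from by
          push_cast; omega]
        rw [show ((0:Int) + (d:Int) + 4) = (d:Int) + 4 from by ring]
      | none =>
        simp only []
        rw [show ((0:Int) + (j:Int) + 1) = max (j:Int) (-1) + 1 from by omega]
        rw [show ((0:Int) + (d:Int) + 4) = (d:Int) + 4 from by ring]
    | none =>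
      cases h2 : pvLast '\\' (s.take d) with
      | some k =>
        simp only []
        rw [show ((0:Int) + (k:Int) + 1) = max (-1) (k:Int) + 1 from by omega]
        rw [show ((0:Int) + (d:Int) + 4) = (d:Int) + 4 from by ring]
      | none =>
        simp only []
        simp only [hlen]
        rw [show (max (-1:Int) (-1) + 1) = (0:Int) from by norm_num]
        rw [show ((0:Int) - ((s.length:Nat):Int)) = -((s.length:Nat):Int) from by ring]
        rw [show ((0:Int) + (d:Int) + 4) = (d:Int) + 4 from by ring]
        rw [pvSlice_negLen s _ hs0]
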